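-- pv_equiv track=rewrite | github.com/Glakra/MATHWIZ | streamlit_app/Grades/Year 5/X.Geometric_measurement/area_and_perimeter_of_figures_on_grids.py | boundary_breakdown
-- ===== SOURCE A (Python) =====
-- def boundary_breakdown(cells):
--     # counts horizontal and vertical boundary segments for explanation
--     S = set(cells)
--     horiz = vert = 0
--     for x,y in S:
--         if (x+1,y) not in S: vert += 1
--         if (x-1,y) not in S: vert += 1
--         if (x,y+1) not in S: horiz += 1
--         if (x,y-1) not in S: horiz += 1
--     return horiz, vert
-- ===== SOURCE B (Python) =====
-- def boundary_breakdown(cells):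
--     # inclusion-exclusion: 2*n cells edges per axis minus 2 per internally shared edge
--     S = set(cells)
--     n = len(S)
--     ph = sum(1 for (x, y) in S if (x + 1, y) in S)
--     pv = sum(1 for (x, y) in S if (x, y + 1) in S)
--     return 2 * n - 2 * pv, 2 * n - 2 * ph
-- ===== Notes on version B (the rewrite author's own statement) =====
-- stated objective: simpler
-- what changed: Instead of testing all four neighbours of every cell, B counts only forward adjacencies (right and up) once each and obtains both boundary counts by inclusion-exclusion: horiz = 2n - 2*pv, vert = 2n - 2*ph, using the symmetry #right-neighbours = #left-neighbours.
import Mathlib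
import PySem

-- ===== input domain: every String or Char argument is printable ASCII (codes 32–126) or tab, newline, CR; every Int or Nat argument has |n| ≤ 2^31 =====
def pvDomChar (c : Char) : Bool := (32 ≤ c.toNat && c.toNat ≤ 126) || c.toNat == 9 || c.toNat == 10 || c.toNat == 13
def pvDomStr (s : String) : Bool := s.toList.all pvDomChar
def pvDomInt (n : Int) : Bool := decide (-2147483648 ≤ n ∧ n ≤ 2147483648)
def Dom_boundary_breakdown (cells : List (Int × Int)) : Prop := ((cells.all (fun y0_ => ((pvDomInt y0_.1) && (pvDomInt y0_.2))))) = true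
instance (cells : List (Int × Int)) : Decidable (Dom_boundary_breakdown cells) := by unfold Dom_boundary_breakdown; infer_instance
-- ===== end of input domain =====

-- B replaces A's four neighbour tests per cell by counting only the right/up adjacencies
-- once and deriving both boundary counts by inclusion-exclusion (objective: simpler).

-- ===== PORT A =====
-- for x,y in S: vert += missing right/left neighbours, horiz += missing up/down neighbours
def boundary_breakdown (cells : List (Int × Int)) : Int × Int :=
  let S : PySem.Set (Int × Int) := PySem.Set.ofList cells
  S.foldl (fun (hv : Int × Int) c =>
    let vert := if S.contains (c.1 + 1, c.2) then hv.2 else hv.2 + 1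
    let vert := if S.contains (c.1 - 1, c.2) then vert else vert + 1
    let horiz := if S.contains (c.1, c.2 + 1) then hv.1 else hv.1 + 1
    let horiz := if S.contains (c.1, c.2 - 1) then horiz else horiz + 1
    (horiz, vert)) (0, 0)

-- ===== PORT B =====
def boundary_breakdown_alt (cells : List (Int × Int)) : Int × Int :=
  let S : PySem.Set (Int × Int) := PySem.Set.ofList cells
  let n : Int := S.length
  let ph : Int := (S.filter (fun c => S.contains (c.1 + 1, c.2))).length
  let pv : Int := (S.filter (fun c => S.contains (c.1, c.2 + 1))).length
  (2 * n - 2 * pv, 2 * n - 2 * ph)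

-- ===== PRECONDITION & SPEC =====
def Spec_boundary_breakdown (cells : List (Int × Int)) (out : Int × Int) : Prop := out = boundary_breakdown_alt cells
instance (cells : List (Int × Int)) (out : Int × Int) : Decidable (Spec_boundary_breakdown cells out) := by unfold Spec_boundary_breakdown; infer_instance

-- ===== CLAIM (what is proved, stated in full; the proofs are below) =====
def Claim_equal_boundary_breakdown : Prop := ∀ (cells : List (Int × Int)), Dom_boundary_breakdown cells → Spec_boundary_breakdown cells (boundary_breakdown cells)

-- ===== LEMMAS AND PROOFS =====

-- A's loop, folded over any list L with membership tests against a fixed S, counts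
-- 2*|L| minus the present neighbours in each direction (stated on the zeta-reduced body).
theorem pv_foldA (S : List (Int × Int)) :
    ∀ (L : List (Int × Int)) (a b : Int),
      L.foldl (fun (hv : Int × Int) c =>
        (if S.contains (c.1, c.2 - 1) then (if S.contains (c.1, c.2 + 1) then hv.1 else hv.1 + 1)
         else (if S.contains (c.1, c.2 + 1) then hv.1 else hv.1 + 1) + 1,
         if S.contains (c.1 - 1, c.2) then (if S.contains (c.1 + 1, c.2) then hv.2 else hv.2 + 1)
         else (if S.contains (c.1 + 1, c.2) then hv.2 else hv.2 + 1) + 1)) (a, b)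
      = (a + 2 * L.length
            - (L.countP (fun c => S.contains (c.1, c.2 + 1)) : Int)
            - (L.countP (fun c => S.contains (c.1, c.2 - 1)) : Int),
         b + 2 * L.length
            - (L.countP (fun c => S.contains (c.1 + 1, c.2)) : Int)
            - (L.countP (fun c => S.contains (c.1 - 1, c.2)) : Int)) := by
  intro L
  induction L with
  | nil => intro a b; simp
  | cons c L ih =>
    intro a b
    simp only [List.foldl_cons, List.countP_cons, List.length_cons]
    rw [ih]
    refine Prod.ext ?_ ?_ <;> simp only [] <;> split_ifs <;> push_cast <;> ring

-- On a Nodup list, as many cells have their up-neighbour in S as have their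
-- down-neighbour in S (bijection c ↦ (c.1, c.2+1)).
theorem pv_sym_v (S : List (Int × Int)) (h : S.Nodup) :
    S.countP (fun c => S.contains (c.1, c.2 + 1))
      = S.countP (fun c => S.contains (c.1, c.2 - 1)) := by
  rw [List.countP_eq_length_filter, List.countP_eq_length_filter,
    ← List.toFinset_card_of_nodup (h.filter _), ← List.toFinset_card_of_nodup (h.filter _),
    List.toFinset_filter, List.toFinset_filter]
  refine Finset.card_nbij' (fun c => (c.1, c.2 + 1)) (fun c => (c.1, c.2 - 1)) ?_ ?_ ?_ ?_
  · intro c hc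
    simp only [Finset.coe_filter, Set.mem_setOf_eq, List.mem_toFinset] at hc ⊢
    refine ⟨by simpa using hc.2, ?_⟩
    simpa using hc.1
  · intro c hc
    simp only [Finset.coe_filter, Set.mem_setOf_eq, List.mem_toFinset] at hc ⊢
    refine ⟨by simpa using hc.2, ?_⟩
    simpa using hc.1
  · intro c _; simp
  · intro c _; simp

theorem pv_sym_h (S : List (Int × Int)) (h : S.Nodup) :
    S.countP (fun c => S.contains (c.1 + 1, c.2))
      = S.countP (fun c => S.contains (c.1 - 1, c.2)) := by
  rw [List.countP_eq_length_filter, List.countP_eq_length_filter,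
    ← List.toFinset_card_of_nodup (h.filter _), ← List.toFinset_card_of_nodup (h.filter _),
    List.toFinset_filter, List.toFinset_filter]
  refine Finset.card_nbij' (fun c => (c.1 + 1, c.2)) (fun c => (c.1 - 1, c.2)) ?_ ?_ ?_ ?_
  · intro c hc
    simp only [Finset.coe_filter, Set.mem_setOf_eq, List.mem_toFinset] at hc ⊢
    refine ⟨by simpa using hc.2, ?_⟩
    simpa using hc.1
  · intro c hc
    simp only [Finset.coe_filter, Set.mem_setOf_eq, List.mem_toFinset] at hc ⊢
    refine ⟨by simpa using hc.2, ?_⟩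
    simpa using hc.1
  · intro c _; simp
  · intro c _; simp

-- ===== VERDICT (by name: the statement is the Claim_ definition above) =====
theorem boundary_breakdown_spec : Claim_equal_boundary_breakdown := by
  intro cells _
  unfold Spec_boundary_breakdown boundary_breakdown boundary_breakdown_alt
  simp only [PySem.Set.contains_eq_listContains]
  refine (pv_foldA (PySem.Set.ofList cells) (PySem.Set.ofList cells) 0 0).trans ?_
  have hnd := PySem.Set.nodup_ofList (xs := cells)
  rw [← List.countP_eq_length_filter, ← List.countP_eq_length_filter,
    pv_sym_v _ hnd, pv_sym_h _ hnd]
  refine Prod.ext ?_ ?_ <;> push_cast <;> ring
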